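-- pv_equiv track=rewrite | github.com/variableFernn/winnowingAlg | public/python/winnowing.py | winnowing
-- ===== SOURCE A (Python) =====
-- def winnowing(hashes, w: int):
--     fp = set()
--     if w <= 0 or len(hashes) < w:
--         return fp
--
--     for i in range(len(hashes) - w + 1):
--         window = hashes[i:i+w]
--         m = min(window)
--         # ambil posisi minimum paling kanan (stabil)
--         j = (w - 1) - window[::-1].index(m)
--         fp.add((m, i + j))
--     return fp
-- ===== SOURCE B (Python) =====
-- def winnowing(hashes, w: int):
--     # O(n) monotonic-deque sliding-window minimum, tracking the rightmost min index.
--     fp = set()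
--     n = len(hashes)
--     if w <= 0 or n < w:
--         return fp
--     dq = []      # indices; values strictly increasing front->back
--     head = 0     # virtual front pointer (no O(n) pop(0))
--     for i in range(n):
--         x = hashes[i]
--         while len(dq) > head and hashes[dq[-1]] >= x:
--             dq.pop()
--         dq.append(i)
--         if dq[head] <= i - w:
--             head += 1
--         if i >= w - 1:
--             r = dq[head]
--             fp.add((hashes[r], r))
--     return fp
-- ===== Notes on version B (the rewrite author's own statement) =====
-- stated objective: faster
-- what changed: Replaced the per-window slice + min + reversed .index scans (O(n*w)) by a single-pass monotonic deque (indices with strictly increasing values, virtual head pointer) that yields the rightmost minimum index of each sliding window in amortized O(1), giving O(n) overall.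
import Mathlib
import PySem

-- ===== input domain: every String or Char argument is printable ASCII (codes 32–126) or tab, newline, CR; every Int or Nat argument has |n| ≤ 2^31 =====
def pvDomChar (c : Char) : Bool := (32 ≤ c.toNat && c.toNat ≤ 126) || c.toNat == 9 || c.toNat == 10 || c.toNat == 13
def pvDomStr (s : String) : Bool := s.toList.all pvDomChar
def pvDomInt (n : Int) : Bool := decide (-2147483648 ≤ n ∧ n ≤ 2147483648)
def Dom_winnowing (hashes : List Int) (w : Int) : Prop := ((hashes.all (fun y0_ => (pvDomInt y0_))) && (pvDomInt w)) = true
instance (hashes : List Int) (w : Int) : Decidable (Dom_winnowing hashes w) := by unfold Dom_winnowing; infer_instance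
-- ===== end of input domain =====

-- B replaces A's per-window slice+min+reversed-index scans by a one-pass monotonic deque
-- (objective: faster; the equivalence below is about the returned set, built in the same order).

-- ===== PORT A =====
def winnowing (hashes : List Int) (w : Int) : List (Int × Int) :=
  let fp : PySem.Set (Int × Int) := []
  if w ≤ 0 ∨ (hashes.length : Int) < w then fp
  else
    (PySem.List.pyRange 0 ((hashes.length : Int) - w + 1) 1).foldl (fun fp i =>
      let window := PySem.List.slice hashes (some i) (some (i + w))
      match PySem.List.min? window (fun x => x) with
      | none => fp      -- unreachable: the window is nonempty
      | some m =>
        -- window[::-1] = window.reverse (PySem.List.slice?_none_none_neg_one)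
        match PySem.List.index? window.reverse m with
        | none => fp    -- unreachable: m ∈ window
        | some t =>
          let j : Int := (w - 1) - (t : Int)
          PySem.Set.add fp (m, i + j)) fp

-- ===== PORT B =====
-- the 'while len(dq) > head and hashes[dq[-1]] >= x: dq.pop()' loop of Source B
def pvPopBack (hashes : List Int) (head : Nat) (x : Int) (dq : List Nat) : List Nat :=
  match hlast : dq.getLast? with
  | none => dq
  | some j =>
    if head < dq.length ∧ x ≤ hashes.getD j 0 then
      pvPopBack hashes head x dq.dropLast
    else dq
termination_by dq.length
decreasing_by
  have hne : dq ≠ [] := by intro h; subst h; simp at hlast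
  have h1 : 0 < dq.length := List.length_pos_of_ne_nil hne
  simp only [List.length_dropLast]; omega

def winnowing_alt (hashes : List Int) (w : Int) : List (Int × Int) :=
  let fp : PySem.Set (Int × Int) := []
  let n := hashes.length
  if w ≤ 0 ∨ (n : Int) < w then fp
  else
    let st := (List.range n).foldl
      (fun (st : PySem.Set (Int × Int) × List Nat × Nat) i =>
        let fp := st.1
        let dq := st.2.1
        let head := st.2.2
        let x := hashes.getD i 0
        let dq := pvPopBack hashes head x dq
        let dq := dq ++ [i]
        let head := if (dq.getD head 0 : Int) ≤ (i : Int) - w then head + 1 else head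
        let fp := if w - 1 ≤ (i : Int) then
            PySem.Set.add fp (hashes.getD (dq.getD head 0) 0, (dq.getD head 0 : Int))
          else fp
        (fp, dq, head)) (fp, [], 0)
    st.1

-- ===== PRECONDITION & SPEC =====
def Spec_winnowing (hashes : List Int) (w : Int) (out : List (Int × Int)) : Prop := out = winnowing_alt hashes w
instance (hashes : List Int) (w : Int) (out : List (Int × Int)) : Decidable (Spec_winnowing hashes w out) := by unfold Spec_winnowing; infer_instance

-- ===== CLAIM (what is proved, stated in full; the proofs are below) =====
def Claim_equal_winnowing : Prop := ∀ (hashes : List Int) (w : Int), Dom_winnowing hashes w → Spec_winnowing hashes w (winnowing hashes w)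

-- ===== LEMMAS AND PROOFS =====

-- hashes[j] for the in-range indices both programs use
def pvH (hashes : List Int) (j : Nat) : Int := hashes.getD j 0

-- "j survives at time t" (elements 0..t-1 processed): every later processed element is strictly larger
def pvGood (hashes : List Int) (t j : Nat) : Prop :=
  ∀ k, k < t → j < k → pvH hashes j < pvH hashes k

-- contents of the active part of the deque after processing elements 0..t-1
def pvCands (hashes : List Int) (W t : Nat) : List Nat :=
  (List.range t).filter
    (fun j => decide (t ≤ j + W) &&
      (List.range t).all (fun k => decide (j < k → pvH hashes j < pvH hashes k)))

def pvRm (hashes : List Int) (W s : Nat) : Nat := (pvCands hashes W (s + W)).headD 0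

def pvPair (hashes : List Int) (W s : Nat) : Int × Int :=
  (pvH hashes (pvRm hashes W s), (pvRm hashes W s : Int))

-- the fingerprint set after processing elements 0..t-1 (windows s = 0 .. t-W)
def pvFp (hashes : List Int) (W t : Nat) : List (Int × Int) :=
  (List.range (t + 1 - W)).foldl (fun fp s => PySem.Set.add fp (pvPair hashes W s)) []

-- rightmost minimum of the window [s, s+W)
def pvRM (hashes : List Int) (W s r : Nat) : Prop :=
  s ≤ r ∧ r < s + W ∧
  (∀ k, s ≤ k → k < s + W → pvH hashes r ≤ pvH hashes k) ∧
  (∀ k, r < k → k < s + W → pvH hashes r < pvH hashes k)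

lemma pvMem_cands (hashes : List Int) (W t j : Nat) :
    j ∈ pvCands hashes W t ↔ j < t ∧ t ≤ j + W ∧ pvGood hashes t j := by
  simp only [pvCands, List.mem_filter, List.mem_range, Bool.and_eq_true, decide_eq_true_eq,
    List.all_eq_true, pvGood]

lemma pvCands_sorted (hashes : List Int) (W t : Nat) :
    (pvCands hashes W t).Pairwise (· < ·) :=
  (List.pairwise_lt_range).filter _

lemma pvCands_hmono (hashes : List Int) (W t : Nat) :
    (pvCands hashes W t).Pairwise (fun a b => pvH hashes a < pvH hashes b) := by
  have hs := pvCands_sorted hashes W t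
  refine List.Pairwise.imp_of_mem ?_ hs
  intro a b ha hb hab
  rcases (pvMem_cands hashes W t b).mp hb with ⟨hb1, _, _⟩
  rcases (pvMem_cands hashes W t a).mp ha with ⟨_, _, hga⟩
  exact hga b hb1 hab

-- the head of pvCands at time s+W is the rightmost-min index of the window [s, s+W)
lemma pvHead_cands (hashes : List Int) (W s r : Nat)
    (hRM : pvRM hashes W s r) : pvRm hashes W s = r := by
  obtain ⟨h1, h2, h3, h4⟩ := hRM
  have hrmem : r ∈ pvCands hashes W (s + W) := by
    rw [pvMem_cands]
    exact ⟨h2, by omega, fun k hk hrk => h4 k hrk hk⟩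
  have hge : ∀ j ∈ pvCands hashes W (s + W), r ≤ j := by
    intro j hj
    rcases (pvMem_cands hashes W (s + W) j).mp hj with ⟨hj1, hj2, hj3⟩
    by_contra hlt
    push Not at hlt
    have hsj : s ≤ j := by omega
    have := hj3 r h2 hlt
    have := h3 j hsj hj1
    omega
  rcases hcl : pvCands hashes W (s + W) with _ | ⟨c, tl⟩
  · rw [hcl] at hrmem; simp at hrmem
  · have hps := pvCands_sorted hashes W (s + W)
    rw [hcl] at hps hrmem hge
    have hc : r ≤ c := hge c (List.mem_cons_self)
    rcases List.mem_cons.mp hrmem with h | h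
    · simpa [pvRm, hcl] using h.symm
    · have := (List.pairwise_cons.mp hps).1 r h
      omega

-- A's window computation produces the rightmost-min pair
lemma pvA_window (hashes : List Int) (W s : Nat) (hW : 1 ≤ W) (hs : s + W ≤ hashes.length) :
    ∃ r, pvRM hashes W s r ∧
      (PySem.List.min? (PySem.List.slice hashes (some (s : Int)) (some ((s : Int) + (W : Int)))) (fun x => x)
        = some (pvH hashes r)) ∧
      (PySem.List.index?
        (PySem.List.slice hashes (some (s : Int)) (some ((s : Int) + (W : Int)))).reverse
        (pvH hashes r) = some (s + W - 1 - r)) := by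
  have hwineq : PySem.List.slice hashes (some (s : Int)) (some ((s : Int) + (W : Int)))
      = (hashes.drop s).take W := PySem.List.slice_natCast_add hashes s W
  set win := PySem.List.slice hashes (some (s : Int)) (some ((s : Int) + (W : Int))) with hwdef
  have hlen : win.length = W := by
    rw [hwineq]; simp only [List.length_take, List.length_drop]; omega
  have hget : ∀ k, (hk : k < W) → win[k]'(by omega) = pvH hashes (s + k) := by
    intro k hk
    have hsk : s + k < hashes.length := by omega
    have : win[k]'(by omega) = hashes[s + k] := by
      simp only [hwineq, List.getElem_take, List.getElem_drop]
    rw [this, pvH, List.getD_eq_getElem hashes 0 hsk]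
  rcases hmq : PySem.List.min? win (fun x => x) with _ | m
  · exfalso
    have := (PySem.List.min?_eq_none_iff (xs := win) (key := fun x => x)).mp hmq
    rw [this] at hlen; simp at hlen; omega
  have hmmem : m ∈ win := PySem.List.min?_mem hmq
  have hmin : ∀ y ∈ win, m ≤ y := fun y hy => PySem.List.min?_isMin hmq y hy
  have hmrev : m ∈ win.reverse := List.mem_reverse.mpr hmmem
  rcases hiq : PySem.List.index? win.reverse m with _ | t
  · rw [PySem.List.index?_eq_none_iff] at hiq
    exact absurd hmrev hiq
  obtain ⟨ht, hrt, hfirst⟩ := PySem.List.getElem_of_index?_eq_some hiq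
  have htW : t < W := by simpa [hlen] using ht
  set r := s + (W - 1 - t) with hrdef
  have hwr : win[W - 1 - t]'(by omega) = m := by
    have := List.getElem_reverse (l := win) (i := t) (by simpa [hlen] using ht)
    rw [hrt] at this
    simpa [hlen] using this.symm
  have hhr : pvH hashes r = m := by rw [← hget (W - 1 - t) (by omega)]; exact hwr
  refine ⟨r, ⟨by omega, by omega, ?_, ?_⟩, by rw [hhr], ?_⟩
  · intro k hk1 hk2
    rw [hhr]
    have hgk := hget (k - s) (by omega)
    have hk' : s + (k - s) = k := by omega
    rw [hk'] at hgk
    rw [← hgk]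
    exact hmin _ (List.getElem_mem _)
  · intro k hk1 hk2
    rw [hhr]
    have hq : k - s < W := by omega
    have hu : W - 1 - (k - s) < t := by omega
    have hne : win.reverse[W - 1 - (k - s)]'(by simp [hlen]; omega) ≠ m := hfirst _ hu
    have hrw : win.reverse[W - 1 - (k - s)]'(by simp [hlen]; omega)
        = win[k - s]'(by omega) := by
      have := List.getElem_reverse (l := win) (i := W - 1 - (k - s)) (by simp [hlen]; omega)
      rw [this]
      congr 1
      omega
    have hgk := hget (k - s) hq
    have hk' : s + (k - s) = k := by omega
    rw [hk'] at hgk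
    have hle : m ≤ pvH hashes k := by
      rw [← hgk]; exact hmin _ (List.getElem_mem _)
    have : pvH hashes k ≠ m := by rw [← hgk, ← hrw]; exact hne
    omega
  · rw [hhr, hiq]
    congr 1
    omega

lemma pvPopBack_of_ge (hashes : List Int) (head : Nat) (x : Int) (dq : List Nat)
    (h : dq.length ≤ head) : pvPopBack hashes head x dq = dq := by
  rw [pvPopBack.eq_def]
  cases hl : dq.getLast? with
  | none => rfl
  | some j => simp [Nat.not_lt.mpr h]

lemma pvPopBack_eq (hashes : List Int) (x : Int) (pre l : List Nat)
    (hmono : l.Pairwise (fun a b => pvH hashes a < pvH hashes b)) :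
    pvPopBack hashes pre.length x (pre ++ l)
      = pre ++ l.filter (fun j => decide (pvH hashes j < x)) := by
  induction l using List.reverseRecOn with
  | nil => simpa using pvPopBack_of_ge hashes pre.length x pre (le_refl _)
  | append_singleton l0 a ih =>
    have hm0 : l0.Pairwise (fun a b => pvH hashes a < pvH hashes b) :=
      (List.pairwise_append.mp hmono).1
    have hha : ∀ b ∈ l0, pvH hashes b < pvH hashes a := by
      intro b hb
      exact (List.pairwise_append.mp hmono).2.2 b hb a (by simp)
    have hlast : (pre ++ (l0 ++ [a])).getLast? = some a := by
      rw [← List.append_assoc]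
      exact List.getLast?_concat
    rw [pvPopBack.eq_def]
    split
    next heq =>
      rw [hlast] at heq
      cases heq
    next j heq =>
      rw [hlast] at heq
      injection heq with heq
      subst heq
      by_cases hax : x ≤ hashes.getD a 0
      · rw [if_pos ⟨by simp, hax⟩]
        have hdrop : (pre ++ (l0 ++ [a])).dropLast = pre ++ l0 := by
          rw [← List.append_assoc]
          exact List.dropLast_concat
        rw [hdrop, ih hm0]
        have hfalse : ¬ (pvH hashes a < x) := not_lt.mpr hax
        simp [List.filter_append, hfalse]
      · rw [if_neg (by intro hc; exact hax hc.2)]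
        have hall : (l0 ++ [a]).filter (fun b => decide (pvH hashes b < x)) = l0 ++ [a] := by
          rw [List.filter_eq_self]
          intro b hb
          have hjx : pvH hashes a < x := by
            simp only [pvH]
            omega
          rcases List.mem_append.mp hb with hb | hb
          · have := hha b hb
            simp only [decide_eq_true_eq]
            omega
          · simp only [List.mem_singleton] at hb
            subst hb
            simpa using hjx
        rw [hall]

lemma pvCands_succ (hashes : List Int) (W t : Nat) (hW : 1 ≤ W) :
    pvCands hashes W (t + 1)
      = (pvCands hashes W t).filter
          (fun j => decide (pvH hashes j < pvH hashes t) && decide (t + 1 ≤ j + W)) ++ [t] := by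
  unfold pvCands
  rw [List.filter_filter, List.range_succ, List.filter_append]
  congr 1
  · apply List.filter_congr
    intro j hj
    have hjt : j < t := List.mem_range.mp hj
    rw [List.all_append]
    have h1 : [t].all (fun k => decide (j < k → pvH hashes j < pvH hashes k))
        = decide (pvH hashes j < pvH hashes t) := by simp [hjt]
    rw [h1]
    have himp : decide (t + 1 ≤ j + W) = true → decide (t ≤ j + W) = true := by
      simp only [decide_eq_true_eq]
      omega
    cases hA : decide (t + 1 ≤ j + W) <;>
      cases hB : (List.range t).all (fun k => decide (j < k → pvH hashes j < pvH hashes k)) <;>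
      cases hC : decide (pvH hashes j < pvH hashes t) <;> simp_all
  · have hp1 : decide (t + 1 ≤ t + W) = true := by
      simp only [decide_eq_true_eq]
      omega
    have hp2 : (List.range t ++ [t]).all
        (fun k => decide (t < k → pvH hashes t < pvH hashes k)) = true := by
      rw [List.all_eq_true]
      intro k hk
      have hkt : k ≤ t := by
        rcases List.mem_append.mp hk with h | h
        · exact le_of_lt (List.mem_range.mp h)
        · simp at h
          omega
      simp only [decide_eq_true_eq]
      omega
    simp
    exact ⟨by omega, fun x hx => Or.inl (by omega)⟩

def pvStep (hashes : List Int) (w : Int)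
    (st : PySem.Set (Int × Int) × List Nat × Nat) (i : Nat) :
    PySem.Set (Int × Int) × List Nat × Nat :=
  let x := hashes.getD i 0
  let dq := pvPopBack hashes st.2.2 x st.2.1 ++ [i]
  let head := if (dq.getD st.2.2 0 : Int) ≤ (i : Int) - w then st.2.2 + 1 else st.2.2
  let fp := if w - 1 ≤ (i : Int) then
      PySem.Set.add st.1 (hashes.getD (dq.getD head 0) 0, (dq.getD head 0 : Int))
    else st.1
  (fp, dq, head)

lemma pvGetD_drop (xs : List Nat) (n : Nat) : xs.getD n 0 = (xs.drop n).headD 0 := by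
  rw [List.getD_eq_getElem?_getD, List.headD_eq_head?_getD, List.head?_drop]

lemma pvStep_spec (hashes : List Int) (w : Int) (hw1 : 1 ≤ w)
    (t : Nat) (fp : PySem.Set (Int × Int)) (dq : List Nat) (head : Nat)
    (hhead : head ≤ dq.length) (hdrop : dq.drop head = pvCands hashes w.toNat t) :
    ∃ dq' head',
      pvStep hashes w (fp, dq, head) t
        = ((if w - 1 ≤ (t : Int)
            then PySem.Set.add fp (pvPair hashes w.toNat (t + 1 - w.toNat)) else fp),
           dq', head')
      ∧ head' ≤ dq'.length ∧ dq'.drop head' = pvCands hashes w.toNat (t + 1) := by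
  set W := w.toNat with hWdef
  have hW1 : 1 ≤ W := by omega
  have hWw : (W : Int) = w := by omega
  set pre := dq.take head with hpre
  have htake : pre.length = head := by
    simp only [hpre, List.length_take]
    omega
  have hsplit : dq = pre ++ pvCands hashes W t := by
    conv_lhs => rw [← List.take_append_drop head dq]
    rw [hdrop]
  have hpop : pvPopBack hashes head (hashes.getD t 0) dq
      = pre
        ++ (pvCands hashes W t).filter (fun j => decide (pvH hashes j < pvH hashes t)) := by
    rw [hsplit, ← htake]
    exact pvPopBack_eq hashes (pvH hashes t) _ _ (pvCands_hmono hashes W t)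
  set L := (pvCands hashes W t).filter (fun j => decide (pvH hashes j < pvH hashes t)) with hLdef
  have hLs : L.Pairwise (· < ·) := List.Pairwise.filter _ (pvCands_sorted hashes W t)
  have hcands := pvCands_succ hashes W t hW1
  have hM : (pvCands hashes W t).filter
        (fun j => decide (pvH hashes j < pvH hashes t) && decide (t + 1 ≤ j + W))
      = L.filter (fun j => decide (t + 1 ≤ j + W)) := by
    rw [hLdef, List.filter_filter]
    apply List.filter_congr
    intro j _
    rw [Bool.and_comm]
  rw [hM] at hcands
  have hdgd : (pre ++ (L ++ [t])).getD head 0 = (L ++ [t]).headD 0 := by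
    rw [pvGetD_drop, ← htake, List.drop_left]
  have hdrop1 : (pre ++ (L ++ [t])).drop head = L ++ [t] := by
    rw [← htake]
    exact List.drop_left
  -- the fingerprint update is determined by the new active part of the deque
  have hfp : ∀ (dq' : List Nat) (head' : Nat),
      dq'.drop head' = pvCands hashes W (t + 1) →
      (if w - 1 ≤ (t : Int) then
          PySem.Set.add fp (hashes.getD (dq'.getD head' 0) 0, (dq'.getD head' 0 : Int))
        else fp)
      = (if w - 1 ≤ (t : Int)
          then PySem.Set.add fp (pvPair hashes W (t + 1 - W)) else fp) := by
    intro dq' head' hd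
    split_ifs with hcond
    · have hWt : t + 1 - W + W = t + 1 := by omega
      have hr : dq'.getD head' 0 = pvRm hashes W (t + 1 - W) := by
        rw [pvGetD_drop, hd, pvRm, hWt]
      rw [hr]
      simp [pvPair, pvH]
    · rfl
  -- does the front of the active part leave the window?
  by_cases hpf : (((L ++ [t]).headD 0 : Nat) : Int) ≤ (t : Int) - w
  · -- yes: L = c :: L' with c + W = t; the head pointer advances
    rcases hLc : L with _ | ⟨c, L'⟩
    · rw [hLc] at hpf
      simp only [List.nil_append, List.headD_cons] at hpf
      omega
    · have hpfc : ((c : Nat) : Int) ≤ (t : Int) - w := by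
        rw [hLc] at hpf
        simpa using hpf
      have hcmem : c ∈ pvCands hashes W t := by
        have : c ∈ L := by rw [hLc]; exact List.mem_cons_self
        exact List.mem_of_mem_filter this
      have hcW : t ≤ c + W := ((pvMem_cands hashes W t c).mp hcmem).2.1
      have hct : c + W = t := by omega
      have hball : ∀ j ∈ L', c < j := fun j hj => (List.pairwise_cons.mp (hLc ▸ hLs)).1 j hj
      have hcnew : pvCands hashes W (t + 1) = L' ++ [t] := by
        rw [hcands, hLc, List.filter_cons_of_neg (by simp; omega),
          List.filter_eq_self.mpr]
        intro j hj
        have := hball j hj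
        simp only [decide_eq_true_eq]
        omega
      have hdropNew : (pre ++ (L ++ [t])).drop (head + 1) = pvCands hashes W (t + 1) := by
        rw [hLc, ← htake, hcnew, List.drop_length_add_append]
        rfl
      refine ⟨pre ++ (L ++ [t]), head + 1, ?_, ?_, hdropNew⟩
      · simp only [pvStep]
        rw [hpop, List.append_assoc, hdgd, if_pos hpf]
        rw [hfp (pre ++ (L ++ [t])) (head + 1) hdropNew]
      · simp only [List.length_append, hLc, List.length_cons]
        omega
  · -- no: the whole popped active part stays in the window
    have hfB : L.filter (fun j => decide (t + 1 ≤ j + W)) = L := by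
      rcases hLc : L with _ | ⟨c, L'⟩
      · rfl
      · have hpfc : ¬ ((c : Nat) : Int) ≤ (t : Int) - w := by
          rw [hLc] at hpf
          simpa using hpf
        have hcmem : c ∈ pvCands hashes W t := by
          have : c ∈ L := by rw [hLc]; exact List.mem_cons_self
          exact List.mem_of_mem_filter this
        have hcW : t ≤ c + W := ((pvMem_cands hashes W t c).mp hcmem).2.1
        have hball : ∀ j ∈ L', c < j := fun j hj => (List.pairwise_cons.mp (hLc ▸ hLs)).1 j hj
        rw [List.filter_eq_self]
        intro j hj
        have hjc : c ≤ j := by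
          rcases List.mem_cons.mp hj with h | h
          · omega
          · exact le_of_lt (hball j h)
        simp only [decide_eq_true_eq]
        omega
    have hcnew : pvCands hashes W (t + 1) = L ++ [t] := by
      rw [hcands, hfB]
    have hdropNew : (pre ++ (L ++ [t])).drop head = pvCands hashes W (t + 1) := by
      rw [hdrop1, hcnew]
    refine ⟨pre ++ (L ++ [t]), head, ?_, ?_, hdropNew⟩
    · simp only [pvStep]
      rw [hpop, List.append_assoc, hdgd, if_neg hpf]
      rw [hfp (pre ++ (L ++ [t])) head hdropNew]
    · simp only [List.length_append]
      omega

lemma pvFp_succ (hashes : List Int) (w : Int) (hw1 : 1 ≤ w) (t : Nat) :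
    (if w - 1 ≤ (t : Int)
        then PySem.Set.add (pvFp hashes w.toNat t) (pvPair hashes w.toNat (t + 1 - w.toNat))
        else pvFp hashes w.toNat t)
      = pvFp hashes w.toNat (t + 1) := by
  set W := w.toNat with hWdef
  have hWw : (W : Int) = w := by omega
  by_cases hc : W ≤ t + 1
  · rw [if_pos (by omega)]
    have h2 : t + 1 + 1 - W = (t + 1 - W) + 1 := by omega
    rw [pvFp, pvFp, h2, List.range_succ, List.foldl_append]
    rfl
  · rw [if_neg (by omega)]
    have h2 : t + 1 + 1 - W = t + 1 - W := by omega
    rw [pvFp, pvFp, h2]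

lemma pvLoop (hashes : List Int) (w : Int) (hw1 : 1 ≤ w) (t : Nat) :
    ∃ dq head,
      (List.range t).foldl (pvStep hashes w) ([], [], 0)
        = (pvFp hashes w.toNat t, dq, head)
      ∧ head ≤ dq.length ∧ dq.drop head = pvCands hashes w.toNat t := by
  induction t with
  | zero =>
    refine ⟨[], 0, ?_, by simp, by simp [pvCands]⟩
    have h0 : 0 + 1 - w.toNat = 0 := by omega
    simp [pvFp, h0]
  | succ t ih =>
    obtain ⟨dq, head, heq, hlen, hdrop⟩ := ih
    obtain ⟨dq', head', heq', hlen', hdrop'⟩ :=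
      pvStep_spec hashes w hw1 t (pvFp hashes w.toNat t) dq head hlen hdrop
    refine ⟨dq', head', ?_, hlen', hdrop'⟩
    rw [List.range_succ, List.foldl_append, heq]
    simp only [List.foldl_cons, List.foldl_nil]
    rw [heq', pvFp_succ hashes w hw1 t]

lemma hRM_bounds {hashes : List Int} {W s r : Nat} (h : pvRM hashes W s r) :
    s ≤ r ∧ r < s + W := ⟨h.1, h.2.1⟩

theorem winnowing_spec : Claim_equal_winnowing := by
  unfold Claim_equal_winnowing Spec_winnowing
  intro hashes w _
  by_cases hc : w ≤ 0 ∨ (hashes.length : Int) < w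
  · rw [winnowing, winnowing_alt]
    simp only [if_pos hc]
  · have hw1 : 1 ≤ w := by omega
    have hwn : w ≤ (hashes.length : Int) := by omega
    have hWw : ((w.toNat : Nat) : Int) = w := by omega
    have hW1 : 1 ≤ w.toNat := by omega
    have hWn : w.toNat ≤ hashes.length := by omega
    -- A's fold, window by window
    have hA : winnowing hashes w
        = (List.range (hashes.length - w.toNat + 1)).foldl
            (fun acc s => PySem.Set.add acc (pvPair hashes w.toNat s)) [] := by
      rw [winnowing]
      simp only [if_neg hc]
      have hrange : (hashes.length : Int) - w + 1
          = ((hashes.length - w.toNat + 1 : Nat) : Int) := by omega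
      rw [hrange, PySem.List.pyRange_zero_nat, List.foldl_map]
      apply PySem.List.foldl_congr_mem
      intro acc s hs
      have hsn : s + w.toNat ≤ hashes.length := by
        have := List.mem_range.mp hs
        omega
      obtain ⟨r, hRM, hmin, hidx⟩ := pvA_window hashes w.toNat s hW1 hsn
      have hcast : ((s : Int) + w) = ((s : Int) + ((w.toNat : Nat) : Int)) := by omega
      rw [hcast]
      simp only [hmin, hidx]
      obtain ⟨hr1, hr2⟩ := hRM_bounds hRM
      have hsecond : (s : Int) + (w - 1 - ((s + w.toNat - 1 - r : Nat) : Int)) = (r : Int) := by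
        omega
      rw [hsecond, pvPair, pvHead_cands hashes w.toNat s r hRM]
    -- B's fold, via the deque invariant
    obtain ⟨dq, head, heq, -, -⟩ := pvLoop hashes w hw1 hashes.length
    have hB : winnowing_alt hashes w = pvFp hashes w.toNat hashes.length := by
      rw [winnowing_alt]
      simp only [if_neg hc]
      exact congrArg Prod.fst heq
    rw [hA, hB, pvFp]
    have hn : hashes.length + 1 - w.toNat = hashes.length - w.toNat + 1 := by omega
    rw [hn]
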